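-- pv_equiv track=rewrite | github.com/NationalCentreTruthReconciliation/Secure-Record-Transfer | app/utility/files.py | count_file_types
-- ===== SOURCE A (Python) =====
-- from collections import defaultdict
-- from typing import List
--
-- def count_file_types(file_names: list, accepted_file_groups: dict[str, List[str]]) -> dict:
--     """Tabulate how many files fall into the file groups specified in the ACCEPTED_FILE_FORMATS
--     dictionary.
--
--     If a file's extension does not match any of the accepted file extensions, it is ignored. For
--     that reason, it is important to ensure that the files are accepted before trying to count them.
--
--     Args:
--         file_names (list): A list of file paths or names with extension intact
--         accepted_file_groups (dict): A dictionary of file group names mapping to a list of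
--             lowercase file extensions without periods.
--
--     Returns:
--         (dict): A dictionary mapping from group name to number of files in that group.
--     """
--     # Invert dict so it maps from extension -> name instead of name -> extensions
--     names_for_extensions = {
--         extension: file_type_name
--         for file_type_name, file_extension_list in accepted_file_groups.items()
--         for extension in file_extension_list
--     }
--
--     counts = defaultdict(int)
--
--     for name in file_names:
--         parts = name.split(".")
--
--         if len(parts) < 2:
--             continue
--
--         extension = parts[-1].lower()
--
--         if extension not in names_for_extensions:
--             continue
--
--         name = names_for_extensions[extension]
--         counts[name] += 1
--
--     return dict(counts)
-- ===== SOURCE B (Python) =====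
-- from collections import Counter
--
--
-- def count_file_types(file_names: list, accepted_file_groups) -> dict:
--     """Count files per accepted file-extension group.
--
--     Two-phase: build a Counter of valid lowercased extensions, then aggregate
--     the per-extension counts into per-group totals via the inverted mapping.
--     """
--     ext_counts = Counter(
--         parts[-1].lower()
--         for parts in (name.split(".") for name in file_names)
--         if len(parts) >= 2
--     )
--
--     group_of = {
--         extension: group
--         for group, extensions in accepted_file_groups.items()
--         for extension in extensions
--     }
--
--     totals = {}
--     for extension, n in ext_counts.items():
--         group = group_of.get(extension)
--         if group is not None:
--             totals[group] = totals.get(group, 0) + n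
--     return totals
-- ===== Notes on version B (the rewrite author's own statement) =====
-- stated objective: alternative
-- what changed: A counts per file in one incrementing loop over file_names; B first builds a Counter histogram of valid lowercased extensions and then aggregates the per-extension counts into group totals via the inverted extension-to-group map, preserving the exact skip (len<2), lowercasing, last-group-wins and insertion-order semantics.
import Mathlib
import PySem

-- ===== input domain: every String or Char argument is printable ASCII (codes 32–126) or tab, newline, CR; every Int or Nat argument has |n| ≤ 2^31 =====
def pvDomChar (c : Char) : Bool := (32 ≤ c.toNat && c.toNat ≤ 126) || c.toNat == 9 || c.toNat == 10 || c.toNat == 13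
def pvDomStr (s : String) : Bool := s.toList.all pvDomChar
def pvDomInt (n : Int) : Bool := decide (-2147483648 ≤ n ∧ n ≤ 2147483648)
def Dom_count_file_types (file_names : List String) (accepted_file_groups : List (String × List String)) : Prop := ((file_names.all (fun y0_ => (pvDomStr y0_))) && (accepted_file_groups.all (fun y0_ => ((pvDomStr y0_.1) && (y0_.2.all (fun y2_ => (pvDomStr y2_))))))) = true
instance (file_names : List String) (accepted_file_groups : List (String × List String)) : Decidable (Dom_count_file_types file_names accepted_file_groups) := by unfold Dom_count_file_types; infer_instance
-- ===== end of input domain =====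

-- B replaces A's per-file incrementing loop by a two-phase pass (histogram of valid
-- extensions via Counter, then aggregation of per-extension counts into group totals);
-- objective: alternative decomposition, same exact result.

-- ===== PORT A =====
def count_file_types (file_names : List String) (accepted_file_groups : List (String × List String)) : List (String × Int) :=
  -- names_for_extensions = {extension: file_type_name ...} (nested dict comprehension)
  let names_for_extensions : PySem.Dict String String :=
    accepted_file_groups.foldl
      (fun d p => p.2.foldl (fun d extension => d.insert extension p.1) d)
      PySem.Dict.empty
  let counts : PySem.Dict String Int :=
    file_names.foldl (fun counts name =>
      -- parts = name.split("."): the separator "." is nonempty, so split? is always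
      -- some and the .getD [""] default is never taken (exact)
      let parts := (PySem.Str.split? name ".").getD [""]
      if parts.length < 2 then counts
      else
        let extension := PySem.Str.lower parts.getLast!   -- parts[-1].lower(); split? never returns []
        match names_for_extensions.get? extension with    -- 'not in' test + lookup
        | none => counts
        | some gname => counts.modify gname 0 (· + 1))    -- counts[name] += 1 on a defaultdict(int)
      PySem.Dict.empty
  counts.items

-- ===== PORT B =====
-- B-side helper: the generator expression's per-name value (valid lowercased extension or skip)
def pvExtOf (name : String) : Option String :=
  let parts := (PySem.Str.split? name ".").getD [""]   -- sep "." ≠ "", default never taken (exact)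
  if parts.length ≥ 2 then some (PySem.Str.lower parts.getLast!) else none

def count_file_types_alt (file_names : List String) (accepted_file_groups : List (String × List String)) : List (String × Int) :=
  -- ext_counts = Counter(valid lowercased extensions)
  let ext_counts : PySem.Dict String Int := PySem.Dict.counter (file_names.filterMap pvExtOf)
  -- group_of = {extension: group ...}
  let group_of : PySem.Dict String String :=
    accepted_file_groups.foldl
      (fun d p => p.2.foldl (fun d extension => d.insert extension p.1) d)
      PySem.Dict.empty
  -- totals: aggregate each (extension, n) of the histogram into its group's tally
  let totals : PySem.Dict String Int :=
    ext_counts.items.foldl (fun d p =>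
      match group_of.get? p.1 with
      | none => d
      | some g => d.insert g (d.getD g 0 + p.2))
      PySem.Dict.empty
  totals.items

-- ===== PRECONDITION & SPEC =====
def Spec_count_file_types (file_names : List String) (accepted_file_groups : List (String × List String)) (out : List (String × Int)) : Prop := out = count_file_types_alt file_names accepted_file_groups
instance (file_names : List String) (accepted_file_groups : List (String × List String)) (out : List (String × Int)) : Decidable (Spec_count_file_types file_names accepted_file_groups out) := by unfold Spec_count_file_types; infer_instance

-- ===== CLAIM (what is proved, stated in full; the proofs are below) =====
def Claim_equal_count_file_types : Prop := ∀ (file_names : List String) (accepted_file_groups : List (String × List String)), Dom_count_file_types file_names accepted_file_groups → Spec_count_file_types file_names accepted_file_groups (count_file_types file_names accepted_file_groups)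

-- ===== LEMMAS AND PROOFS =====

-- a loop that skips elements on which f is none is a loop over the filterMap
theorem pvFoldlFilterMap {α β γ : Type} (f : α → Option β) (step : γ → β → γ)
    (xs : List α) (init : γ) :
    xs.foldl (fun acc a => (f a).elim acc (step acc)) init
      = (xs.filterMap f).foldl step init := by
  induction xs generalizing init with
  | nil => rfl
  | cons x xs ih => cases h : f x <;> simp [List.filterMap_cons, h, ih]

-- A's loop body, rewritten through pvExtOf ∘ lookup
theorem pvStepA (nfe : PySem.Dict String String) (acc : PySem.Dict String Int) (name : String) :
    (let parts := (PySem.Str.split? name ".").getD [""]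
     if parts.length < 2 then acc
     else match nfe.get? (PySem.Str.lower parts.getLast!) with
       | none => acc | some g => acc.modify g 0 (· + 1))
    = ((pvExtOf name).bind nfe.get?).elim acc (fun g => acc.modify g 0 (· + 1)) := by
  simp only [pvExtOf]
  by_cases h : ((PySem.Str.split? name ".").getD [""]).length ≥ 2
  · cases hg : nfe.get? (PySem.Str.lower ((((PySem.Str.split? name ".").getD [""]).getLast?).getD "")) <;>
      simp [h, Nat.not_lt.mpr h, hg]
  · simp [h, Nat.lt_of_not_le (by omega : ¬ 2 ≤ ((PySem.Str.split? name ".").getD [""]).length)]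

theorem pvKeysInsert (d : PySem.Dict String Int) (k : String) (v : Int) :
    (d.insert k v).keys = PySem.Set.add d.keys k := by
  have h := PySem.Dict.keys_foldl_insert (ν := Int) [k] (fun _ _ => v) d
  simpa [PySem.Set.update] using h

-- value of the aggregation fold at a key
theorem pvGetDFold (m : String → Option String) (w : String → Int) :
    ∀ (E : List String) (d : PySem.Dict String Int) (g : String),
    (E.foldl (fun d e => (m e).elim d (fun g' => d.insert g' (d.getD g' 0 + w e))) d).getD g 0
    = d.getD g 0 + ((E.filter (fun e => decide (m e = some g))).map w).sum := by
  intro E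
  induction E with
  | nil => simp
  | cons e E ih =>
    intro d g
    cases h : m e with
    | none => simp [h, ih]
    | some g' =>
      by_cases hg : g = g'
      · subst hg
        simp [h, ih, PySem.Dict.getD_insert_self]
        ring
      · simp [h, ih, PySem.Dict.getD_insert_of_ne _ _ _ hg, hg, Ne.symm hg]

-- keys of the aggregation fold
theorem pvKeysFold (m : String → Option String) (w : String → Int) :
    ∀ (E : List String) (d : PySem.Dict String Int),
    (E.foldl (fun d e => (m e).elim d (fun g' => d.insert g' (d.getD g' 0 + w e))) d).keys
    = PySem.Set.update d.keys (E.filterMap m) := by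
  intro E
  induction E with
  | nil => intro d; simp [PySem.Set.update]
  | cons e E ih =>
    intro d
    cases h : m e with
    | none => simp [h, List.filterMap_cons, ih]
    | some g' => simp [h, List.filterMap_cons, ih, pvKeysInsert, PySem.Set.update]

-- a dict with nodup keys is its keys paired with their values
theorem pvGetDMem : ∀ (l : List (String × Int)), (l.map (·.1)).Nodup →
    ∀ p ∈ l, (PySem.Dict.mk l).getD p.1 0 = p.2 := by
  intro l
  induction l with
  | nil => intro _ p hp; simp at hp
  | cons q l ih =>
    obtain ⟨qk, qv⟩ := q
    intro hnd p hp
    rw [List.map_cons, List.nodup_cons] at hnd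
    rcases List.mem_cons.mp hp with rfl | hp2
    · simp [PySem.Dict.getD, PySem.Dict.get?_mk_cons]
    · have hne : qk ≠ p.1 := by
        intro hEq
        subst hEq
        exact hnd.1 (List.mem_map_of_mem (f := fun x => x.1) hp2)
      have := ih hnd.2 p hp2
      simpa [PySem.Dict.getD, PySem.Dict.get?_mk_cons, hne] using this

theorem pvItemsEq (d : PySem.Dict String Int) (h : d.keys.Nodup) :
    d.items = d.keys.map (fun k => (k, d.getD k 0)) := by
  cases d with
  | mk l =>
    simp only [PySem.Dict.keys_mk, List.map_map]
    have : ∀ p ∈ l, ((fun k => (k, (PySem.Dict.mk l).getD k 0)) ∘ (·.1)) p = id p := by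
      intro p hp
      have := pvGetDMem l (by simpa [PySem.Dict.keys_mk] using h) p hp
      simp [this]
    simp [List.map_congr_left this]

theorem pvSumZero (P : String → Bool) (x : String) :
    ∀ (E : List String), x ∉ E →
    ((E.filter P).map (fun e => if e = x then (1:Int) else 0)).sum = 0 := by
  intro E
  induction E with
  | nil => simp
  | cons e E ih =>
    intro hx
    have hne : e ≠ x := fun h => hx (h ▸ List.mem_cons_self)
    have hx' : x ∉ E := fun h => hx (List.mem_cons_of_mem _ h)
    cases hP : P e <;> simp [hP, hne, ih hx']

theorem pvSumOne (P : String → Bool) (x : String) :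
    ∀ (E : List String), E.Nodup → x ∈ E →
    ((E.filter P).map (fun e => if e = x then (1:Int) else 0)).sum
      = if P x then 1 else 0 := by
  intro E
  induction E with
  | nil => intro _ hx; simp at hx
  | cons e E ih =>
    intro hnd hx
    rcases List.mem_cons.mp hx with hx | hx
    · subst hx
      have hnin : x ∉ E := (List.nodup_cons.mp hnd).1
      cases hP : P x <;> simp [hP, pvSumZero P x E hnin]
    · have hne : e ≠ x := fun h => (List.nodup_cons.mp hnd).1 (h ▸ hx)
      cases hP : P e <;> simp [hP, hne, ih (List.nodup_cons.mp hnd).2 hx]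

-- summing per-extension multiplicities over the distinct extensions = counting per file
theorem pvCountSum (m : String → Option String) (g : String) :
    ∀ (xs : List String) (E : List String), E.Nodup → (∀ x ∈ xs, x ∈ E) →
    ((E.filter (fun e => decide (m e = some g))).map (fun e => (xs.count e : Int))).sum
      = ((xs.filterMap m).count g : Int) := by
  intro xs
  induction xs with
  | nil =>
    intro E _ _
    apply List.sum_eq_zero
    intro y hy
    rw [List.mem_map] at hy
    obtain ⟨e, -, he⟩ := hy
    simp [← he]
  | cons x xs ih =>
    intro E hnd hmem
    have hx : x ∈ E := hmem x List.mem_cons_self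
    have hmem' : ∀ y ∈ xs, y ∈ E := fun y hy => hmem y (List.mem_cons_of_mem _ hy)
    have hcount : ∀ e, (((x :: xs).count e : Int))
        = (xs.count e : Int) + (if e = x then (1:Int) else 0) := by
      intro e
      rcases eq_or_ne e x with rfl | hex
      · simp [List.count_cons]
      · simp [List.count_cons, hex, Ne.symm hex]
    calc ((E.filter (fun e => decide (m e = some g))).map (fun e => ((x :: xs).count e : Int))).sum
        = ((E.filter (fun e => decide (m e = some g))).map
            (fun e => (xs.count e : Int) + (if e = x then (1:Int) else 0))).sum := by
          exact congrArg _ (List.map_congr_left (fun e _ => hcount e))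
      _ = ((E.filter (fun e => decide (m e = some g))).map (fun e => (xs.count e : Int))).sum
          + ((E.filter (fun e => decide (m e = some g))).map (fun e => if e = x then (1:Int) else 0)).sum := by
          rw [← List.sum_map_add]
      _ = ((xs.filterMap m).count g : Int) + (if decide (m x = some g) then (1:Int) else 0) := by
          rw [ih E hnd hmem', pvSumOne _ x E hnd hx]
      _ = (((x :: xs).filterMap m).count g : Int) := by
          cases h : m x with
          | none => simp [List.filterMap_cons, h]
          | some g' =>
            rcases eq_or_ne g g' with rfl | hgg
            · simp [List.filterMap_cons, h, List.count_cons]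
            · simp [List.filterMap_cons, h, List.count_cons, hgg, Ne.symm hgg]

theorem pvOfListAppend (l : List String) (x : String) :
    PySem.Set.ofList (l ++ [x]) = PySem.Set.add (PySem.Set.ofList l) x := by
  simp [PySem.Set.ofList_eq_foldl, List.foldl_append]

theorem pvAddMem (s : PySem.Set String) (x : String) (h : x ∈ s) :
    PySem.Set.add s x = s := by
  simp [PySem.Set.add, PySem.Set.contains, h]

-- dedup commutes with filterMap under dedup (first occurrences line up)
theorem pvOfListFilterMap (m : String → Option String) :
    ∀ (xs : List String),
    PySem.Set.ofList ((PySem.Set.ofList xs).filterMap m) = PySem.Set.ofList (xs.filterMap m) := by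
  intro xs
  induction xs using List.reverseRecOn with
  | nil => rfl
  | append_singleton xs x ih =>
    rw [pvOfListAppend]
    by_cases hx : x ∈ PySem.Set.ofList xs
    · rw [pvAddMem _ _ hx, ih]
      have hxmem : x ∈ xs := (PySem.Set.mem_ofList xs x).mp hx
      cases h : m x with
      | none => simp [List.filterMap_append, List.filterMap_cons, h]
      | some g =>
        have hg : g ∈ xs.filterMap m := List.mem_filterMap.mpr ⟨x, hxmem, h⟩
        rw [List.filterMap_append]
        simp only [List.filterMap_cons, h, List.filterMap_nil]
        rw [pvOfListAppend, pvAddMem _ _ ((PySem.Set.mem_ofList _ g).mpr hg)]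
    · have : PySem.Set.add (PySem.Set.ofList xs) x = PySem.Set.ofList xs ++ [x] := by
        simp [PySem.Set.add, PySem.Set.contains, hx]
      rw [this, List.filterMap_append, List.filterMap_append]
      cases h : m x with
      | none => simp [List.filterMap_cons, h, ih]
      | some g =>
        simp only [List.filterMap_cons, h, List.filterMap_nil]
        rw [pvOfListAppend, pvOfListAppend, ih]

-- ===== VERDICT (by name: the statement is the Claim_ definition above) =====
theorem count_file_types_spec : Claim_equal_count_file_types := by
  intro file_names accepted_file_groups _
  unfold Spec_count_file_types
  simp only [count_file_types, count_file_types_alt]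
  set nfe : PySem.Dict String String :=
    accepted_file_groups.foldl
      (fun d p => p.2.foldl (fun d extension => d.insert extension p.1) d)
      PySem.Dict.empty with hnfe
  set xs : List String := file_names.filterMap pvExtOf with hxs
  set gs : List String := xs.filterMap nfe.get? with hgs
  -- A side: the loop is Counter over the per-file groups
  have hA : (file_names.foldl (fun (counts : PySem.Dict String Int) name =>
      let parts := (PySem.Str.split? name ".").getD [""]
      if parts.length < 2 then counts
      else
        match nfe.get? (PySem.Str.lower parts.getLast!) with
        | none => counts
        | some gname => counts.modify gname 0 (· + 1)) PySem.Dict.empty)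
      = PySem.Dict.counter gs := by
    have h1 : (fun (counts : PySem.Dict String Int) name =>
        let parts := (PySem.Str.split? name ".").getD [""]
        if parts.length < 2 then counts
        else
          match nfe.get? (PySem.Str.lower parts.getLast!) with
          | none => counts
          | some gname => counts.modify gname 0 (· + 1))
        = (fun (acc : PySem.Dict String Int) name =>
            ((pvExtOf name).bind nfe.get?).elim acc (fun g => acc.modify g 0 (· + 1))) := by
      funext acc name
      exact pvStepA nfe acc name
    rw [h1, PySem.Dict.counter_eq_foldl, hgs, hxs, List.filterMap_filterMap]
    exact pvFoldlFilterMap (fun n => (pvExtOf n).bind nfe.get?) (fun (d : PySem.Dict String Int) g => d.modify g 0 (· + 1)) file_names PySem.Dict.empty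
  rw [hA, PySem.Dict.items_counter]
  -- B side: replace the loop body's match by Option.elim, pointwise
  have hB1 : ((PySem.Dict.counter xs).items.foldl (fun (d : PySem.Dict String Int) p =>
      match nfe.get? p.1 with
      | none => d
      | some g => d.insert g (d.getD g 0 + p.2)) PySem.Dict.empty)
      = ((PySem.Dict.counter xs).items.foldl (fun (d : PySem.Dict String Int) p =>
          (nfe.get? p.1).elim d (fun g => d.insert g (d.getD g 0 + p.2))) PySem.Dict.empty) := by
    apply PySem.List.foldl_congr_mem
    intro d p hp
    cases h : nfe.get? p.1 <;> simp [h]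
  rw [hB1, PySem.Dict.items_counter, List.foldl_map]
  set E : List String := PySem.Set.ofList xs with hE
  set totals : PySem.Dict String Int :=
    E.foldl (fun d e =>
      (nfe.get? e).elim d (fun g => d.insert g (d.getD g 0 + (xs.count e : Int)))) PySem.Dict.empty with htotals
  have hkeys : totals.keys = PySem.Set.ofList gs := by
    rw [htotals, pvKeysFold nfe.get? (fun e => (xs.count e : Int)) E PySem.Dict.empty]
    have : (PySem.Dict.empty : PySem.Dict String Int).keys = [] := rfl
    rw [this]
    have hupd : PySem.Set.update ([] : PySem.Set String) (E.filterMap nfe.get?)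
        = PySem.Set.ofList (E.filterMap nfe.get?) := by
      simp [PySem.Set.update, PySem.Set.ofList_eq_foldl]
    rw [hupd, hE, pvOfListFilterMap, ← hgs]
  have hval : ∀ k, totals.getD k 0 = (gs.count k : Int) := by
    intro k
    rw [htotals, pvGetDFold nfe.get? (fun e => (xs.count e : Int)) E PySem.Dict.empty k]
    have h0 : (PySem.Dict.empty : PySem.Dict String Int).getD k 0 = 0 := rfl
    rw [h0, zero_add, hgs]
    exact pvCountSum nfe.get? k xs E (PySem.Set.nodup_ofList xs)
      (fun x hx => (PySem.Set.mem_ofList xs x).mpr hx)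
  have hnodup : totals.keys.Nodup := by rw [hkeys]; exact PySem.Set.nodup_ofList gs
  rw [pvItemsEq totals hnodup, hkeys]
  exact List.map_congr_left (fun k _ => by rw [hval k])
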